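-- pv_equiv track=rewrite | github.com/Harshini295/Music_Generator | music_generator/utils.py | estimate_key_signature
-- ===== SOURCE A (Python) =====
-- def estimate_key_signature(pitches):
--     """Estimate key signature from pitch distribution"""
--     if not pitches:
--         return "C"
--
--     # Simple key estimation based on most common notes
--     pitch_classes = [p % 12 for p in pitches]
--     pitch_counts = {}
--     for pc in pitch_classes:
--         pitch_counts[pc] = pitch_counts.get(pc, 0) + 1
--
--     # Major scale templates
--     major_scales = {
--         'C': [0, 2, 4, 5, 7, 9, 11],
--         'D': [2, 4, 6, 7, 9, 11, 1],
--         'E': [4, 6, 8, 9, 11, 1, 3],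
--         'F': [5, 7, 9, 10, 0, 2, 4],
--         'G': [7, 9, 11, 0, 2, 4, 6],
--         'A': [9, 11, 1, 2, 4, 6, 8],
--         'B': [11, 1, 3, 4, 6, 8, 10]
--     }
--
--     best_key = 'C'
--     best_score = 0
--
--     for key, scale in major_scales.items():
--         score = sum(pitch_counts.get(pc, 0) for pc in scale)
--         if score > best_score:
--             best_score = score
--             best_key = key
--
--     return best_key
-- ===== SOURCE B (Python) =====
-- # Inverted index: for each pitch class, the major keys whose scale contains it.
-- _KEYS_FOR = {
--     0: ['C', 'F', 'G'],
--     1: ['D', 'E', 'A', 'B'],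
--     2: ['C', 'D', 'F', 'G', 'A'],
--     3: ['E', 'B'],
--     4: ['C', 'D', 'E', 'F', 'G', 'A', 'B'],
--     5: ['C', 'F'],
--     6: ['D', 'E', 'G', 'A', 'B'],
--     7: ['C', 'D', 'F', 'G'],
--     8: ['E', 'A', 'B'],
--     9: ['C', 'D', 'E', 'F', 'G', 'A'],
--     10: ['F', 'B'],
--     11: ['C', 'D', 'E', 'G', 'A', 'B'],
-- }
-- _KEY_ORDER = ['C', 'D', 'E', 'F', 'G', 'A', 'B']
--
-- def estimate_key_signature(pitches):
--     """Estimate key signature from pitch distribution (inverted-index pass)."""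
--     if not pitches:
--         return "C"
--     scores = {k: 0 for k in _KEY_ORDER}
--     for p in pitches:
--         for k in _KEYS_FOR[p % 12]:
--             scores[k] += 1
--     best_key = 'C'
--     best_score = 0
--     for k in _KEY_ORDER:
--         if scores[k] > best_score:
--             best_score = scores[k]
--             best_key = k
--     return best_key
-- ===== Notes on version B (the rewrite author's own statement) =====
-- stated objective: alternative
-- what changed: Replaces A's per-pitch-class counting dict plus a per-key sum over each 7-note scale template by a precomputed inverted pitch-class-to-keys index and a single push pass that increments every matching key's score per pitch; the winner is still picked by the same strict-> scan over C,D,E,F,G,A,B.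
import Mathlib
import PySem

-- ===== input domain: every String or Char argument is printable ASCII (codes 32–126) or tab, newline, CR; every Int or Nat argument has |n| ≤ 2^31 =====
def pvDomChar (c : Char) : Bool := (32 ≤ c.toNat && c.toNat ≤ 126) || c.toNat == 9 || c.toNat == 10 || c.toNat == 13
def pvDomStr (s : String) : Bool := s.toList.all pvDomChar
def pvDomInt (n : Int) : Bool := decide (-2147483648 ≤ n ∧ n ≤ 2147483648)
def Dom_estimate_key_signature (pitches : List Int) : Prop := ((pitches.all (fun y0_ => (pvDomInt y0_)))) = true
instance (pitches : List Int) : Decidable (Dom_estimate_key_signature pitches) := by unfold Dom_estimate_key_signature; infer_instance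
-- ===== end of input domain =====

-- B replaces A's per-key sum over all twelve pitch-class counts by a single push pass over the
-- pitches through an inverted pitch-class→keys index (alternative decomposition, same cost).

-- ===== PORT A =====
def pvScales : List (String × List Int) :=
  [("C", [0, 2, 4, 5, 7, 9, 11]),
   ("D", [2, 4, 6, 7, 9, 11, 1]),
   ("E", [4, 6, 8, 9, 11, 1, 3]),
   ("F", [5, 7, 9, 10, 0, 2, 4]),
   ("G", [7, 9, 11, 0, 2, 4, 6]),
   ("A", [9, 11, 1, 2, 4, 6, 8]),
   ("B", [11, 1, 3, 4, 6, 8, 10])]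

def estimate_key_signature (pitches : List Int) : String :=
  if pitches = [] then "C"
  else
    let pitch_classes := pitches.map (fun p => PySem.Int.mod p 12)
    let pitch_counts : PySem.Dict Int Int :=
      pitch_classes.foldl (fun d pc => d.insert pc (d.getD pc 0 + 1)) PySem.Dict.empty
    let r := pvScales.foldl
      (fun (st : String × Int) ks =>
        let score := (ks.2.map (fun pc => pitch_counts.getD pc 0)).sum
        if score > st.2 then (ks.1, score) else st)
      ("C", 0)
    r.1

-- ===== PORT B =====
def pvKeysFor : List (Int × List String) :=
  [(0, ["C", "F", "G"]),
   (1, ["D", "E", "A", "B"]),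
   (2, ["C", "D", "F", "G", "A"]),
   (3, ["E", "B"]),
   (4, ["C", "D", "E", "F", "G", "A", "B"]),
   (5, ["C", "F"]),
   (6, ["D", "E", "G", "A", "B"]),
   (7, ["C", "D", "F", "G"]),
   (8, ["E", "A", "B"]),
   (9, ["C", "D", "E", "F", "G", "A"]),
   (10, ["F", "B"]),
   (11, ["C", "D", "E", "G", "A", "B"])]

def pvKeyOrder : List String := ["C", "D", "E", "F", "G", "A", "B"]

def estimate_key_signature_alt (pitches : List Int) : String :=
  if pitches = [] then "C"
  else
    let scores0 : PySem.Dict String Int :=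
      pvKeyOrder.foldl (fun d k => d.insert k 0) PySem.Dict.empty
    -- scores[k] += 1 : key always present (every index entry is in pvKeyOrder), so modify is exact
    let scores := pitches.foldl
      (fun d p =>
        ((PySem.Dict.ofList pvKeysFor).getD (PySem.Int.mod p 12) []).foldl
          (fun d k => d.modify k 0 (· + 1)) d)
      scores0
    let r := pvKeyOrder.foldl
      (fun (st : String × Int) k =>
        if scores.getD k 0 > st.2 then (k, scores.getD k 0) else st)
      ("C", 0)
    r.1

-- ===== PRECONDITION & SPEC =====
def Spec_estimate_key_signature (pitches : List Int) (out : String) : Prop := out = estimate_key_signature_alt pitches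
instance (pitches : List Int) (out : String) : Decidable (Spec_estimate_key_signature pitches out) := by unfold Spec_estimate_key_signature; infer_instance

-- ===== CLAIM (what is proved, stated in full; the proofs are below) =====
def Claim_equal_estimate_key_signature : Prop := ∀ (pitches : List Int), Dom_estimate_key_signature pitches → Spec_estimate_key_signature pitches (estimate_key_signature pitches)

-- ===== LEMMAS AND PROOFS =====

-- B's accumulation pass, per key: each pitch contributes (keys-for-its-pc).count k.
theorem pv_bfold (l : List Int) (d : PySem.Dict String Int) (k : String) :
    (l.foldl
      (fun d p =>
        ((PySem.Dict.ofList pvKeysFor).getD (PySem.Int.mod p 12) []).foldl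
          (fun d k => d.modify k 0 (· + 1)) d)
      d).getD k 0
    = d.getD k 0
      + (l.map (fun p =>
          ((((PySem.Dict.ofList pvKeysFor).getD (PySem.Int.mod p 12) []).count k : Int)))).sum := by
  induction l generalizing d with
  | nil => simp
  | cons p t ih =>
    simp only [List.foldl_cons, List.map_cons, List.sum_cons, ih,
      PySem.Dict.getD_foldl_modify_add_one]
    ring

-- A's per-key score, pushed through the pitches: double-counting swap.
theorem pv_indicator (pc : Int) (scale : List Int) :
    (scale.map (fun q => ((if q == pc then (1 : Nat) else 0 : Nat) : Int))).sum
    = (scale.count pc : Int) := by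
  push_cast
  rw [PySem.List.sum_map_ite_one_zero]
  simp [List.count_eq_countP]

theorem pv_afold (l : List Int) (scale : List Int) :
    (scale.map (fun q =>
      (PySem.Dict.counter (l.map (fun p => PySem.Int.mod p 12))).getD q 0)).sum
    = (l.map (fun p => ((scale.count (PySem.Int.mod p 12) : Int)))).sum := by
  induction l with
  | nil => simp [PySem.Dict.getD_counter]
  | cons p t ih =>
    simp only [PySem.Dict.getD_counter] at ih ⊢
    simp only [List.map_cons, List.count_cons, List.sum_cons]
    push_cast
    rw [List.sum_map_add]
    rw [ih, ← pv_indicator (PySem.Int.mod p 12) scale]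
    push_cast
    simp [BEq.comm]
    ring

-- The inverted table agrees with the scale templates on every pitch class 0..11.
theorem pv_table (pc : Int) (h0 : 0 ≤ pc) (h1 : pc < 12) (k : String) (scale : List Int)
    (h : (k, scale) ∈ pvScales) :
    ((((PySem.Dict.ofList pvKeysFor).getD pc []).count k : Int)) = (scale.count pc : Int) := by
  fin_cases h <;> interval_cases pc <;> decide

-- Per key: B's accumulated score equals A's template-sum score.
theorem pv_score (pitches : List Int) (k : String) (scale : List Int)
    (h : (k, scale) ∈ pvScales) :
    (pitches.foldl
      (fun d p =>
        ((PySem.Dict.ofList pvKeysFor).getD (PySem.Int.mod p 12) []).foldl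
          (fun d k => d.modify k 0 (· + 1)) d)
      ((((((((PySem.Dict.empty.insert "C" (0 : Int)).insert "D" 0).insert "E" 0).insert "F" 0).insert "G" 0).insert "A" 0).insert "B" 0))).getD k 0
    = (scale.map (fun q =>
        (PySem.Dict.counter (pitches.map (fun p => PySem.Int.mod p 12))).getD q 0)).sum := by
  rw [pv_bfold, pv_afold]
  have h0 : (((((((((PySem.Dict.empty.insert "C" (0 : Int)).insert "D" 0).insert "E" 0).insert "F" 0).insert "G" 0).insert "A" 0).insert "B" 0)).getD k 0 : Int) = 0 := by
    fin_cases h <;> decide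
  rw [h0, zero_add]
  congr 1
  apply List.map_congr_left
  intro p _
  exact pv_table (PySem.Int.mod p 12) (PySem.Int.mod_nonneg p (by norm_num))
    (PySem.Int.mod_lt p (by norm_num)) k scale h

-- ===== VERDICT (by name: the statement is the Claim_ definition above) =====
theorem estimate_key_signature_spec : Claim_equal_estimate_key_signature := by
  intro pitches _
  unfold Spec_estimate_key_signature estimate_key_signature estimate_key_signature_alt
  by_cases h : pitches = []
  · simp [h]
  · simp only [if_neg h]
    have hC := pv_score pitches "C" [0, 2, 4, 5, 7, 9, 11] (by decide)
    have hD := pv_score pitches "D" [2, 4, 6, 7, 9, 11, 1] (by decide)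
    have hE := pv_score pitches "E" [4, 6, 8, 9, 11, 1, 3] (by decide)
    have hF := pv_score pitches "F" [5, 7, 9, 10, 0, 2, 4] (by decide)
    have hG := pv_score pitches "G" [7, 9, 11, 0, 2, 4, 6] (by decide)
    have hA := pv_score pitches "A" [9, 11, 1, 2, 4, 6, 8] (by decide)
    have hB := pv_score pitches "B" [11, 1, 3, 4, 6, 8, 10] (by decide)
    simp only [pvScales, pvKeyOrder, List.foldl_cons, List.foldl_nil]
    rw [PySem.Dict.foldl_insert_getD_add_one_eq_counter]
    rw [hC, hD, hE, hF, hG, hA, hB]
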